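-- pv_equiv track=rewrite | github.com/xpessoles/Informatique_PDF | 2021_2022/pdf/TP14_piles_files.py | inversion_ext
-- ===== SOURCE A (Python) =====
-- def est_vide(p):
--     return len(p)==0
--
-- def depiler(p):
--     assert len(p)>0
--     return p.pop()
--
-- def inversion_ext(p):
--     mem=[]
--     ext=p[-1]
--     while est_vide(p)==False:
--         mem.append(depiler(p))
--     p.append(ext)
--     for i in range(len(mem)-1):
--         p.append(depiler(mem))
--     return p
-- ===== SOURCE B (Python) =====
-- def inversion_ext(p):
--     ext = p.pop()
--     p.insert(0, ext)
--     return p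
-- ===== Notes on version B (the rewrite author's own statement) =====
-- stated objective: simpler
-- what changed: Replaced the two-loop transfer through an auxiliary stack (pop everything into mem, then pop all but one back) with a direct in-place rotation: pop the top element and insert it at index 0; same mutation of the argument list, no auxiliary list and no element-by-element Python loops.
import Mathlib
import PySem

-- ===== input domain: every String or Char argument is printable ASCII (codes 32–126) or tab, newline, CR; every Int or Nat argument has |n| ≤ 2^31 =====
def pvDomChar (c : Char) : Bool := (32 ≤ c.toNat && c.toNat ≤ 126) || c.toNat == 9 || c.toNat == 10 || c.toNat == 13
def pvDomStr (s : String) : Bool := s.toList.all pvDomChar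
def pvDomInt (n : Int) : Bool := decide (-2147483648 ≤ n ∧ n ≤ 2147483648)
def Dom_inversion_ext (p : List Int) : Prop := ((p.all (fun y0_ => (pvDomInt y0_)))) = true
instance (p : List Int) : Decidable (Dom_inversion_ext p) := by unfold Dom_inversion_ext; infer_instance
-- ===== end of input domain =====

-- B replaces A's two-loop transfer through an auxiliary stack with a single pop + insert-at-front
-- (simpler decomposition, same mutation of the argument; equivalence here is about the returned value).

-- ===== PORT A =====
-- while est_vide(p)==False: mem.append(depiler(p))   — pop from the end of q, append to mem
def pvWhileA (q mem : List Int) : List Int :=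
  match _h : PySem.List.pop? q (-1) with
  | none => mem
  | some r => pvWhileA r.2 (mem ++ [r.1])
termination_by q.length
decreasing_by
  have := PySem.List.length_of_pop?_eq_some q _h
  omega

-- for i in range(len(mem)-1): p.append(depiler(mem))
def pvForA : Nat → List Int → List Int → List Int
  | 0, acc, _ => acc
  | n + 1, acc, mem =>
    match PySem.List.pop? mem (-1) with
    | none => acc          -- unreachable: the loop runs len(mem)-1 times (assert in depiler)
    | some r => pvForA n (acc ++ [r.1]) r.2

def inversion_ext (p : List Int) : List Int :=
  match PySem.List.pyGet? p (-1) with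
  | none => []               -- IndexError on empty p; excluded by Pre_
  | some ext =>
    let mem := pvWhileA p []
    pvForA (mem.length - 1) [ext] mem

-- ===== PORT B =====
def inversion_ext_alt (p : List Int) : List Int :=
  match PySem.List.pop? p (-1) with
  | none => []               -- IndexError on empty p; excluded by Pre_
  | some r => PySem.List.insert r.2 0 r.1

-- ===== PRECONDITION & SPEC =====
-- Pre_ excludes only the empty list, on which both Pythons raise IndexError.
def Pre_inversion_ext (p : List Int) : Prop := p ≠ []
instance (p : List Int) : Decidable (Pre_inversion_ext p) := by unfold Pre_inversion_ext; infer_instance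
def pvWitness_inversion_ext : List Int := [1, 2, 3]

def Spec_inversion_ext (p : List Int) (out : List Int) : Prop := out = inversion_ext_alt p
instance (p : List Int) (out : List Int) : Decidable (Spec_inversion_ext p out) := by unfold Spec_inversion_ext; infer_instance

-- ===== CLAIM (what is proved, stated in full; the proofs are below) =====
def Claim_equal_inversion_ext : Prop := ∀ (p : List Int), Dom_inversion_ext p → Pre_inversion_ext p → Spec_inversion_ext p (inversion_ext p)

-- ===== LEMMAS AND PROOFS =====

theorem pvWhileA_eq (q mem : List Int) : pvWhileA q mem = mem ++ q.reverse := by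
  induction q using List.reverseRecOn generalizing mem with
  | nil => rw [pvWhileA.eq_def]; simp [PySem.List.pop?, PySem.List.pyIdx?]
  | append_singleton l a ih =>
    rw [pvWhileA.eq_def]
    split
    · next heq => rw [PySem.List.pop?_last] at heq; exact absurd heq (by simp)
    · next r heq =>
      rw [PySem.List.pop?_last] at heq
      cases heq
      rw [ih]
      simp

theorem pvForA_eq (n : Nat) (acc mem : List Int) (h : n ≤ mem.length) :
    pvForA n acc mem = acc ++ mem.reverse.take n := by
  induction n generalizing acc mem with
  | zero => simp [pvForA]
  | succ k ih =>
    rcases List.eq_nil_or_concat mem with rfl | ⟨l, a, rfl⟩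
    · simp at h
    · simp only [List.concat_eq_append] at h ⊢
      rw [pvForA]
      simp only [PySem.List.pop?_last]
      rw [ih (acc ++ [a]) l (by simp at h ⊢; omega)]
      simp

-- ===== VERDICT (by name: the statement is the Claim_ definition above) =====
theorem inversion_ext_spec : Claim_equal_inversion_ext := by
  intro p _ hpre
  rcases List.eq_nil_or_concat p with rfl | ⟨l, a, rfl⟩
  · exact absurd rfl hpre
  · simp only [List.concat_eq_append]
    show inversion_ext (l ++ [a]) = inversion_ext_alt (l ++ [a])
    rw [inversion_ext, inversion_ext_alt]
    rw [PySem.List.pyGet?_neg_one_append_singleton, PySem.List.pop?_last]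
    simp only [pvWhileA_eq, List.nil_append, List.reverse_append, List.reverse_cons,
      List.reverse_nil, List.nil_append, List.singleton_append, List.length_cons,
      List.length_reverse, Nat.add_sub_cancel]
    rw [pvForA_eq l.length [a] (a :: l.reverse) (by simp)]
    simp [PySem.List.insert_zero]
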